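-- pv_equiv track=rewrite | github.com/Demidei/Python_Homework | homework3ex5.py | Fibb_and_neg
-- ===== SOURCE A (Python) =====
-- def Fibb_and_neg(n):
--     neg_fibb = [0]
--     for i in range(n):
--         if i < 2:
--             neg_fibb.append(1)
--         else:
--             neg_fibb.append(neg_fibb[2 * i] + neg_fibb[2 * i - 1])
--         neg_fibb.insert(0, neg_fibb[2 * i + 1] * ((-1) ** (i % 2)))
--     return neg_fibb
-- ===== SOURCE B (Python) =====
-- def Fibb_and_neg(n):
--     # Phase 1: build the plain Fibonacci base [0, 1, 1, 2, ...] (n appended terms).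
--     fib = [0]
--     for i in range(n):
--         fib.append(1 if i < 2 else fib[-1] + fib[-2])
--     # Phase 2: signed mirror of the positive part, assembled once.
--     left = [fib[i + 1] * (-1) ** i for i in range(n - 1, -1, -1)]
--     return left + fib
-- ===== Notes on version B (the rewrite author's own statement) =====
-- stated objective: simpler
-- what changed: B builds only the positive Fibonacci base list in one forward pass and then produces the negative-index half as a signed reversed mapping over it, instead of A's simultaneous append and insert-at-front into a single two-ended list with doubled index arithmetic.
import Mathlib
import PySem

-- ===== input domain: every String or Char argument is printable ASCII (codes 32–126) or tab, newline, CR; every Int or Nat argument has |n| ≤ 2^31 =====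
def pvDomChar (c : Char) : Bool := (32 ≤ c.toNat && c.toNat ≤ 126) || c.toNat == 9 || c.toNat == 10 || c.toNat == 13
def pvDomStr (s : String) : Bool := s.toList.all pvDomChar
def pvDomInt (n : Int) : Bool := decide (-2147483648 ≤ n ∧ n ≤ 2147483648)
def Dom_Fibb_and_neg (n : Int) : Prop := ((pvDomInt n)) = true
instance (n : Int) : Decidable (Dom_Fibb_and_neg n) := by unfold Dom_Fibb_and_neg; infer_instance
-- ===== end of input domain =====

-- B builds the positive Fibonacci base once and maps a signed reversed copy in front of it,
-- instead of A's simultaneous append + insert(0) into one two-ended list (objective: simpler).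

-- ===== PORT A =====
-- One loop iteration of A.  All indices 2*i, 2*i-1, 2*i+1 are provably in range for every i
-- produced by range(n) (the list has length 2*i+1 at the start of iteration i), so pyGetD
-- with default 0 is exact (Python never raises here).
def fibbStepA (l : List Int) (i : Int) : List Int :=
  let l2 := if i < 2 then l ++ [1]
            else l ++ [PySem.List.pyGetD l (2 * i) 0 + PySem.List.pyGetD l (2 * i - 1) 0]
  PySem.List.pyGetD l2 (2 * i + 1) 0 * (-1) ^ (PySem.Int.mod i 2).toNat :: l2

def Fibb_and_neg (n : Int) : List Int :=
  (PySem.List.pyRange 0 n 1).foldl fibbStepA [0]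

-- ===== PORT B =====
-- One append step of B's base-building loop (fib[-1], fib[-2] are always in range when read).
def fibStepB (fib : List Int) (i : Int) : List Int :=
  fib ++ [if i < 2 then 1
          else PySem.List.pyGetD fib (-1) 0 + PySem.List.pyGetD fib (-2) 0]

-- (-1) ** i with i ≥ 0 (all i in range(n-1,-1,-1) are ≥ 0) is (-1)^i.toNat;
-- fib[i+1] is always in range, so pyGetD with default 0 is exact.
def Fibb_and_neg_alt (n : Int) : List Int :=
  let fib := (PySem.List.pyRange 0 n 1).foldl fibStepB [0]
  let left := (PySem.List.pyRange (n - 1) (-1) (-1)).map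
    (fun i => PySem.List.pyGetD fib (i + 1) 0 * (-1) ^ i.toNat)
  left ++ fib

-- ===== PRECONDITION & SPEC =====
def Spec_Fibb_and_neg (n : Int) (out : List Int) : Prop := out = Fibb_and_neg_alt n
instance (n : Int) (out : List Int) : Decidable (Spec_Fibb_and_neg n out) := by
  unfold Spec_Fibb_and_neg; infer_instance

-- ===== CLAIM (what is proved, stated in full; the proofs are below) =====
def Claim_equal_Fibb_and_neg : Prop := ∀ (n : Int), Dom_Fibb_and_neg n → Spec_Fibb_and_neg n (Fibb_and_neg n)

-- ===== LEMMAS AND PROOFS =====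

-- Closed forms both loops converge to.
def posFib (k : Nat) : List Int := 0 :: (List.range k).map (fun j => (Nat.fib (j + 1) : Int))

def spineL (k : Nat) : List Int :=
  (List.range k).reverse.map (fun j => (Nat.fib (j + 1) : Int) * (-1) ^ j)

def spine (k : Nat) : List Int := spineL k ++ posFib k

theorem posFib_length (k : Nat) : (posFib k).length = k + 1 := by
  simp [posFib]

theorem spineL_length (k : Nat) : (spineL k).length = k := by
  simp [spineL]

theorem spine_length (k : Nat) : (spine k).length = 2 * k + 1 := by
  simp [spine, posFib_length, spineL_length]; omega

theorem posFib_getD (k j : Nat) (hj : j ≤ k) : (posFib k).getD j 0 = (Nat.fib j : Int) := by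
  rw [List.getD_eq_getElem _ _ (by rw [posFib_length]; omega)]
  cases j with
  | zero => simp [posFib]
  | succ m =>
      simp only [posFib, List.getElem_cons_succ]
      rw [List.getElem_map, List.getElem_range]

theorem spine_getD (k j : Nat) (hj : j ≤ k) :
    (spine k).getD (k + j) 0 = (Nat.fib j : Int) := by
  have hlen : (spine k).length = 2 * k + 1 := spine_length k
  rw [List.getD_eq_getElem _ _ (by omega)]
  unfold spine
  rw [List.getElem_append_right (by rw [spineL_length]; omega)]
  have := posFib_getD k j hj
  rw [List.getD_eq_getElem _ _ (by rw [posFib_length]; omega)] at this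
  rw [← this]
  congr 1
  rw [spineL_length]
  omega

theorem spine_getD_int (k : Nat) (j : Nat) (hj : j ≤ k) :
    PySem.List.pyGetD (spine k) ((k : Int) + (j : Int)) 0 = (Nat.fib j : Int) := by
  have : ((k : Int) + (j : Int)) = ((k + j : Nat) : Int) := by push_cast; ring
  rw [this, PySem.List.pyGetD_natCast]
  exact spine_getD k j hj

theorem neg_one_pow_mod_two (k : Nat) : ((-1 : Int)) ^ (k % 2) = (-1) ^ k := by
  rcases Nat.even_or_odd k with h | h
  · rw [Nat.even_iff.mp h, Even.neg_one_pow h]; norm_num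
  · rw [Nat.odd_iff.mp h, Odd.neg_one_pow h]; norm_num

theorem int_mod_two_cast (k : Nat) : (PySem.Int.mod (k : Int) 2).toNat = k % 2 := by
  simp [PySem.Int.mod, Int.fmod_eq_emod]
  omega

theorem spine_succ (k : Nat) :
    spine (k + 1) = ((Nat.fib (k + 1) : Int) * (-1) ^ k) :: (spine k ++ [(Nat.fib (k + 1) : Int)]) := by
  unfold spine spineL posFib
  simp [List.range_succ, List.map_append]

theorem getD_append_last (l : List Int) (x : Int) :
    (l ++ [x]).getD l.length 0 = x := by
  rw [List.getD_eq_getElem _ _ (by simp)]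
  simp

-- A's loop reaches spine k.
theorem A_loop (k : Nat) :
    (PySem.List.pyRange 0 (k : Int) 1).foldl fibbStepA [0] = spine k := by
  induction k with
  | zero => simp [spine, spineL, posFib]
  | succ k ih =>
      have hcast : ((k + 1 : Nat) : Int) = (k : Int) + 1 := by push_cast; ring
      rw [hcast, PySem.List.pyRange_one_succ_right (by positivity), List.foldl_append, ih]
      simp only [List.foldl_cons, List.foldl_nil]
      match k with
      | 0 => decide
      | 1 => decide
      | (m + 2) =>
        set k := m + 2 with hk
        have hk2 : ¬ ((k : Int) < 2) := by omega
        unfold fibbStepA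
        simp only [hk2, if_false]
        have h1 : (2 * (k : Int)) = (k : Int) + (k : Int) := by ring
        have h2 : ((k : Int) + (k : Int) - 1) = (k : Int) + ((k - 1 : Nat) : Int) := by
          push_cast [Nat.cast_sub (by omega : 1 ≤ k)]; ring
        rw [h1, spine_getD_int k k (le_refl k), h2, spine_getD_int k (k - 1) (by omega)]
        have hfib : (Nat.fib k : Int) + (Nat.fib (k - 1) : Int) = (Nat.fib (k + 1) : Int) := by
          have h := Nat.fib_add_two (n := k - 1)
          rw [show k - 1 + 2 = k + 1 by omega, show k - 1 + 1 = k by omega] at h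
          rw [h]; push_cast; ring
        rw [hfib]
        have hlast : PySem.List.pyGetD (spine k ++ [(Nat.fib (k + 1) : Int)]) ((k : Int) + (k : Int) + 1) 0
            = (Nat.fib (k + 1) : Int) := by
          have h3 : ((k : Int) + (k : Int) + 1) = ((2 * k + 1 : Nat) : Int) := by push_cast; ring
          rw [h3, PySem.List.pyGetD_natCast]
          have := getD_append_last (spine k) (Nat.fib (k + 1) : Int)
          rwa [spine_length] at this
        rw [hlast, int_mod_two_cast, neg_one_pow_mod_two]
        conv_rhs => rw [spine_succ]

-- B's base loop builds posFib k.
theorem B_loop (k : Nat) :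
    (PySem.List.pyRange 0 (k : Int) 1).foldl fibStepB [0] = posFib k := by
  induction k with
  | zero => simp [posFib]
  | succ k ih =>
      have hcast : ((k + 1 : Nat) : Int) = (k : Int) + 1 := by push_cast; ring
      rw [hcast, PySem.List.pyRange_one_succ_right (by positivity), List.foldl_append, ih]
      simp only [List.foldl_cons, List.foldl_nil]
      match k with
      | 0 => decide
      | 1 => decide
      | (m + 2) =>
        set k := m + 2 with hk
        have hk2 : ¬ ((k : Int) < 2) := by omega
        unfold fibStepB
        simp only [hk2, if_false]
        have hlen : (posFib k).length = k + 1 := posFib_length k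
        have hm1 : PySem.List.pyGetD (posFib k) (-1) 0 = (Nat.fib k : Int) := by
          rw [PySem.List.pyGetD_neg_ofNat (posFib k) 1 0 (by omega) (by omega)]
          have := posFib_getD k k (le_refl k)
          rw [List.getD_eq_getElem _ _ (by omega)] at this
          rw [← this]
          congr 1
          omega
        have hm2 : PySem.List.pyGetD (posFib k) (-2) 0 = (Nat.fib (k - 1) : Int) := by
          rw [PySem.List.pyGetD_neg_ofNat (posFib k) 2 0 (by omega) (by omega)]
          have := posFib_getD k (k - 1) (by omega)
          rw [List.getD_eq_getElem _ _ (by omega)] at this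
          rw [← this]
          congr 1
          omega
        rw [hm1, hm2]
        have hfib : (Nat.fib k : Int) + (Nat.fib (k - 1) : Int) = (Nat.fib (k + 1) : Int) := by
          have h := Nat.fib_add_two (n := k - 1)
          rw [show k - 1 + 2 = k + 1 by omega, show k - 1 + 1 = k by omega] at h
          rw [h]; push_cast; ring
        rw [hfib]
        simp [posFib, List.range_succ]

-- (range k).reverse written as a forward map.
theorem range_reverse_map (k : Nat) :
    (List.range k).reverse = (List.range k).map (fun i => k - 1 - i) := by
  rw [List.range_eq_range', List.reverse_range']
  simp [← List.range_eq_range']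

-- B's comprehension equals spineL k.
theorem B_left (k : Nat) :
    (PySem.List.pyRange ((k : Int) - 1) (-1) (-1)).map
      (fun i => PySem.List.pyGetD (posFib k) (i + 1) 0 * (-1) ^ i.toNat) = spineL k := by
  rw [PySem.List.pyRange_neg_one, List.map_map]
  rw [show ((k : Int) - 1 - (-1)).toNat = k by omega]
  unfold spineL
  rw [range_reverse_map, List.map_map]
  apply List.map_congr_left
  intro j hj
  have hjk : j < k := List.mem_range.mp hj
  simp only [Function.comp]
  have h1 : ((k : Int) - 1 - (j : Int)) = ((k - 1 - j : Nat) : Int) := by omega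
  rw [h1]
  have h2 : (((k - 1 - j : Nat) : Int) + 1) = ((k - 1 - j + 1 : Nat) : Int) := by push_cast; ring
  rw [h2, PySem.List.pyGetD_natCast, posFib_getD k (k - 1 - j + 1) (by omega)]
  simp

-- ===== VERDICT (by name: the statement is the Claim_ definition above) =====
theorem Fibb_and_neg_spec : Claim_equal_Fibb_and_neg := by
  intro n _
  unfold Spec_Fibb_and_neg Fibb_and_neg Fibb_and_neg_alt
  rcases le_or_gt n 0 with hn | hn
  · rw [PySem.List.pyRange_one_eq_nil hn, PySem.List.pyRange_neg_one_eq_nil (by omega)]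
    simp
  · obtain ⟨k, rfl⟩ : ∃ k : Nat, n = (k : Int) := ⟨n.toNat, (Int.toNat_of_nonneg hn.le).symm⟩
    rw [A_loop k]
    simp only []
    rw [B_loop k, B_left k]
    rfl
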